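-- pv_equiv track=rewrite | github.com/DIG-Network/proof_research | sub-problems/verifier-oracle-model/experiments/adaptive-coordinate-or-rsparse-xor-tree-depth-wt-three-four-n7/script.py | build_coord_partition_masks
-- ===== SOURCE A (Python) =====
-- N = 7
--
-- def build_coord_partition_masks(masks: list[int]) -> list[tuple[int, int]]:
--     dom = len(masks)
--     out: list[tuple[int, int]] = []
--     for i in range(N):
--         b0 = 0
--         b1 = 0
--         for k, m in enumerate(masks):
--             if (m >> i) & 1:
--                 b1 |= 1 << k
--             else:
--                 b0 |= 1 << k
--         out.append((b0, b1))
--     return out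
-- ===== SOURCE B (Python) =====
-- N = 7
--
-- def build_coord_partition_masks(masks: list[int]) -> list[tuple[int, int]]:
--     out = [(0, 0)] * N
--     for m in reversed(masks):
--         out = [(2 * b0 + 1 - ((m >> i) & 1), 2 * b1 + ((m >> i) & 1))
--                for i, (b0, b1) in enumerate(out)]
--     return out
-- ===== Notes on version B (the rewrite author's own statement) =====
-- stated objective: alternative
-- what changed: A makes 7 scans over masks (one per coordinate) OR-ing 1<<k into b0 or b1 via an if/else; B never computes per-index powers 1<<k at all: it walks the mask list back-to-front, Horner-style doubling all 7 (b0,b1) accumulator pairs and adding the bit (resp. 1-bit) of the current mask, so each index's weight arises from repeated doubling instead of explicit shifts.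
import Mathlib
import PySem

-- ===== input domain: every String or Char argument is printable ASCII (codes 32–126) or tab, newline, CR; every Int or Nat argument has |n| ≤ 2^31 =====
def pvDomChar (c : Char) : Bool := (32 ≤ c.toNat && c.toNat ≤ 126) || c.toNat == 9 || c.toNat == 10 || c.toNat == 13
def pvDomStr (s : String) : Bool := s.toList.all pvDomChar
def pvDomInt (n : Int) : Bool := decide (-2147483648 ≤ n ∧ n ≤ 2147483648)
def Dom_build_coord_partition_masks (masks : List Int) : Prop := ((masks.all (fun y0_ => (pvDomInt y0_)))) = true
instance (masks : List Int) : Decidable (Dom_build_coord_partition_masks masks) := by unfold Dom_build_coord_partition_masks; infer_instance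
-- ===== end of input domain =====

-- B replaces A's 7 per-coordinate scans that OR 1<<k into b0 or b1 by a single back-to-front
-- Horner pass: all 7 (b0,b1) pairs are doubled and the current mask's bit (resp. 1-bit) is added,
-- so no per-index power 1<<k is ever computed (alternative decomposition, same cost).

-- ===== PORT A =====
-- literal port of A: outer loop over range(7); inner loop over enumerate(masks) accumulating
-- (b0, b1) via an if/else with |=. Shift counts are the nonnegative range/enumerate indices,
-- so `.toNat` is exact.
def build_coord_partition_masks (masks : List Int) : List (Int × Int) :=
  (PySem.List.pyRange 0 7 1).foldl (fun out i =>
    let bp := (PySem.List.enumerate masks).foldl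
      (fun (b : Int × Int) km =>
        if PySem.Int.band (km.2 >>> i.toNat) 1 ≠ 0 then
          (b.1, PySem.Int.bor b.2 ((1:Int) <<< km.1.toNat))
        else
          (PySem.Int.bor b.1 ((1:Int) <<< km.1.toNat), b.2))
      ((0:Int), (0:Int))
    out ++ [bp]) []

-- ===== PORT B =====
-- literal port of Source B: out = [(0,0)]*7; for m in reversed(masks): rebuild out by the
-- Horner comprehension [(2*b0 + 1 - ((m>>i)&1), 2*b1 + ((m>>i)&1)) for i,(b0,b1) in enumerate(out)].
-- The enumerate index i is 0..6, nonnegative, so shifting by it as an Int is exact.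
def build_coord_partition_masks_alt (masks : List Int) : List (Int × Int) :=
  masks.reverse.foldl
    (fun out m =>
      (PySem.List.enumerate out).map
        (fun ib =>
          (2 * ib.2.1 + 1 - PySem.Int.band (m >>> ib.1) 1,
           2 * ib.2.2 + PySem.Int.band (m >>> ib.1) 1)))
    (List.replicate 7 ((0:Int), (0:Int)))

-- ===== PRECONDITION & SPEC =====
def Spec_build_coord_partition_masks (masks : List Int) (out : List (Int × Int)) : Prop := out = build_coord_partition_masks_alt masks
instance (masks : List Int) (out : List (Int × Int)) : Decidable (Spec_build_coord_partition_masks masks out) := by unfold Spec_build_coord_partition_masks; infer_instance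

-- ===== CLAIM (what is proved, stated in full; the proofs are below) =====
def Claim_equal_build_coord_partition_masks : Prop := ∀ (masks : List Int), Dom_build_coord_partition_masks masks → Spec_build_coord_partition_masks masks (build_coord_partition_masks masks)

-- ===== LEMMAS AND PROOFS =====

def pvBit (m : Int) (i : Nat) : Int := PySem.Int.band (m >>> (i : Int)) 1
def pvS1 (i : Nat) : List Int → Int
  | [] => 0
  | m :: ms => pvBit m i + 2 * pvS1 i ms
def pvS0 (i : Nat) : List Int → Int
  | [] => 0
  | m :: ms => (1 - pvBit m i) + 2 * pvS0 i ms

lemma pvBit_bounds (m : Int) (i : Nat) : 0 ≤ pvBit m i ∧ pvBit m i < 2 := by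
  unfold pvBit
  rw [PySem.Int.band_one]
  exact ⟨PySem.Int.mod_nonneg _ (by norm_num), PySem.Int.mod_lt _ (by norm_num)⟩
lemma pv_bor_two_pow (x : Int) (k : Nat) (h0 : 0 ≤ x) (h : x < 2 ^ k) :
    PySem.Int.bor x (2 ^ k) = x + 2 ^ k := by
  obtain ⟨m, rfl⟩ := Int.eq_ofNat_of_zero_le h0
  have hm : m < 2 ^ k := by exact_mod_cast h
  have hc : ((2:Int) ^ k) = ((2 ^ k : Nat) : Int) := by push_cast; ring
  have ha := Nat.two_pow_add_eq_or_of_lt hm 1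
  rw [Nat.mul_one] at ha
  rw [hc, PySem.Int.bor_natCast, Nat.lor_comm, ← ha]
  push_cast; ring
lemma pv_one_shl (k : Nat) : ((1:Int) <<< k) = 2 ^ k := by simp [Int.shiftLeft_eq]

lemma pvA_inner (j : Nat) (ms : List Int) : ∀ (k : Nat) (b0 b1 : Int),
    0 ≤ b0 → b0 < 2 ^ k → 0 ≤ b1 → b1 < 2 ^ k →
    (PySem.List.enumerate ms (k : Int)).foldl
      (fun (b : Int × Int) (km : Int × Int) =>
        if PySem.Int.band (km.2 >>> ((j:Nat):Int)) 1 ≠ 0 then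
          (b.1, PySem.Int.bor b.2 ((1:Int) <<< (km.1.toNat : Int)))
        else
          (PySem.Int.bor b.1 ((1:Int) <<< (km.1.toNat : Int)), b.2))
      (b0, b1)
    = (b0 + 2 ^ k * pvS0 j ms, b1 + 2 ^ k * pvS1 j ms) := by
  induction ms with
  | nil => intro k b0 b1 _ _ _ _; simp [PySem.List.enumerate_nil, pvS0, pvS1]
  | cons m ms ih =>
    intro k b0 b1 h00 h01 h10 h11
    simp only [PySem.List.enumerate_cons, List.foldl_cons]
    have hcast : ((k : Int) + 1) = ((k + 1 : Nat) : Int) := by push_cast; ring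
    have htn : ((k : Int)).toNat = k := Int.toNat_natCast k
    have hb := pvBit_bounds m j
    have h2k : (0:Int) < 2 ^ k := by positivity
    by_cases hc : PySem.Int.band (m >>> ((j:Nat):Int)) 1 ≠ 0
    · have hbit : pvBit m j = 1 := by unfold pvBit at hb ⊢; omega
      rw [if_pos hc, htn, Int.shiftLeft_natCast_right, pv_one_shl k]
      rw [hcast, ih (k+1) b0 (PySem.Int.bor b1 (2^k)) h00 (by rw [pow_succ]; omega)
            (by rw [pv_bor_two_pow b1 k h10 h11]; omega)
            (by rw [pv_bor_two_pow b1 k h10 h11, pow_succ]; omega)]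
      rw [pv_bor_two_pow b1 k h10 h11]
      simp [pvS0, pvS1, hbit, pow_succ]; constructor <;> ring
    · have hbit : pvBit m j = 0 := by unfold pvBit at hb ⊢; omega
      rw [if_neg hc, htn, Int.shiftLeft_natCast_right, pv_one_shl k]
      rw [hcast, ih (k+1) (PySem.Int.bor b0 (2^k)) b1
            (by rw [pv_bor_two_pow b0 k h00 h01]; omega)
            (by rw [pv_bor_two_pow b0 k h00 h01, pow_succ]; omega)
            h10 (by rw [pow_succ]; omega)]
      rw [pv_bor_two_pow b0 k h00 h01]
      simp [pvS0, pvS1, hbit, pow_succ]; constructor <;> ring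

lemma pvA_eval (masks : List Int) :
    build_coord_partition_masks masks
      = (PySem.List.pyRange 0 7 1).map (fun i => (pvS0 i.toNat masks, pvS1 i.toNat masks)) := by
  unfold build_coord_partition_masks
  rw [PySem.List.foldl_append_singleton_eq_map]
  apply List.map_congr_left
  intro i hi
  have h := pvA_inner i.toNat masks 0 0 0 le_rfl (by norm_num) le_rfl (by norm_num)
  simpa only [Nat.cast_zero, pow_zero, one_mul, zero_add] using h

lemma pvB_eval (masks : List Int) :
    build_coord_partition_masks_alt masks
      = [(pvS0 0 masks, pvS1 0 masks), (pvS0 1 masks, pvS1 1 masks),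
         (pvS0 2 masks, pvS1 2 masks), (pvS0 3 masks, pvS1 3 masks),
         (pvS0 4 masks, pvS1 4 masks), (pvS0 5 masks, pvS1 5 masks),
         (pvS0 6 masks, pvS1 6 masks)] := by
  unfold build_coord_partition_masks_alt
  rw [List.foldl_reverse]
  induction masks with
  | nil => simp [pvS0, pvS1, List.replicate]
  | cons m ms ih =>
    rw [List.foldr_cons, ih]
    simp only [PySem.List.enumerate_cons, PySem.List.enumerate_nil, List.map_cons, List.map_nil]
    norm_num [pvS0, pvS1, pvBit]
    and_intros <;> ring

-- ===== VERDICT (by name: the statement is the Claim_ definition above) =====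
theorem build_coord_partition_masks_spec : Claim_equal_build_coord_partition_masks := by
  intro masks _
  unfold Spec_build_coord_partition_masks
  rw [pvA_eval, pvB_eval]
  have hr : PySem.List.pyRange 0 7 1 = [0,1,2,3,4,5,6] := by decide
  rw [hr]
  norm_num
  and_intros <;> rfl
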